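-- pv_equiv track=rewrite | github.com/Albertree/SOAR-ARC-test | procedural_memory/base_rules/_primitives.py | staircase_expand
-- ===== SOURCE A (Python) =====
-- def staircase_expand(grid):
--     """Expand a 1-row grid with colored prefix into a staircase triangle.
--     Input: 1 row with K colored cells followed by zeros.
--     Output: K rows where row i has (K-i) colored cells."""
--     if len(grid) != 1:
--         return None
--     row = grid[0]
--     w = len(row)
--     bg = 0
--     # Find colored prefix length
--     k = 0
--     for c in row:
--         if c != bg:
--             k += 1
--         else:
--             break
--     if k == 0:
--         return None
--     # Build staircase
--     output = []
--     for i in range(k):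
--         new_row = [bg] * w
--         for j in range(k - i):
--             new_row[j] = row[j]
--         output.append(new_row)
--     return output
-- ===== SOURCE B (Python) =====
-- def staircase_expand(grid):
--     """Expand a 1-row grid with colored prefix into a staircase triangle."""
--     if len(grid) != 1:
--         return None
--     row = grid[0]
--     w = len(row)
--     # Collect the colored prefix itself (not just its length).
--     prefix = []
--     for c in row:
--         if c == 0:
--             break
--         prefix.append(c)
--     if not prefix:
--         return None
--
--     # Structural recursion on the shrinking prefix: each row is the padded
--     # prefix, and the remaining rows are the staircase of prefix[:-1].
--     def build(p):
--         if not p: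
--             return []
--         return [p + [0] * (w - len(p))] + build(p[:-1])
--
--     return build(prefix)
-- ===== Notes on version B (the rewrite author's own statement) =====
-- stated objective: alternative
-- what changed: B extracts the colored prefix as a list and builds the staircase by structural recursion on that shrinking prefix (each row is the padded prefix, the rest is the staircase of prefix[:-1]), instead of A's counter k plus nested indexed loops writing cells into preallocated rows.
import Mathlib
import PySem

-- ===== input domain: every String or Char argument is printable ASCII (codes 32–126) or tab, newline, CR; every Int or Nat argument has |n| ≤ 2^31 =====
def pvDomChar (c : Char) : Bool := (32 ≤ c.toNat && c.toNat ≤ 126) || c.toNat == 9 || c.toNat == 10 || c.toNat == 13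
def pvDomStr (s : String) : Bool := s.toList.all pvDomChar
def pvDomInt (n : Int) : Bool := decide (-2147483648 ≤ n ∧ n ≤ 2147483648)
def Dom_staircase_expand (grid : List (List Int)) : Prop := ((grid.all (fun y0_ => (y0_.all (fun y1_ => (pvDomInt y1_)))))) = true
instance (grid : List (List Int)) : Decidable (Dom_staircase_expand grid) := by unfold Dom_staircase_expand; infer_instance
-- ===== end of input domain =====

-- B collects the colored prefix as a list and builds the staircase by structural
-- recursion on the shrinking prefix, instead of A's counter plus nested indexed
-- loops writing cells into preallocated rows (objective: alternative; same values).

-- ===== PORT A =====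
-- the 'for c in row: if c != bg: k += 1 else: break' counting loop of A
def colorPrefixLen : List Int → Int → Nat
  | [], _ => 0
  | c :: rest, bg => if c ≠ bg then colorPrefixLen rest bg + 1 else 0

def staircase_expand (grid : List (List Int)) : Option (List (List Int)) :=
  if grid.length ≠ 1 then none
  else
    let row := grid.headD []
    let w := row.length
    let bg : Int := 0
    let k := colorPrefixLen row bg
    if k = 0 then none
    else
      -- for i in range(k): new_row = [bg]*w; for j in range(k-i): new_row[j] = row[j]; output.append(new_row)
      some ((List.range k).foldl
        (fun output i =>
          output ++ [(List.range (k - i)).foldl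
            (fun new_row j => new_row.set j (row.getD j bg))
            (List.replicate w bg)])
        [])

-- ===== PORT B =====
-- B's prefix-collecting loop: 'for c in row: if c == 0: break; prefix.append(c)'
def takeColored : List Int → List Int
  | [] => []
  | c :: rest => if c = 0 then [] else c :: takeColored rest

-- B's recursive builder: build(p) = [] if not p else [p padded] + build(p[:-1])
def pvBuild (w : Nat) (p : List Int) : List (List Int) :=
  if h : p = [] then []
  else (p ++ List.replicate (w - p.length) 0) :: pvBuild w p.dropLast
termination_by p.length
decreasing_by
  rw [List.length_dropLast]
  have := List.length_pos_iff.mpr h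
  omega

def staircase_expand_alt (grid : List (List Int)) : Option (List (List Int)) :=
  if grid.length ≠ 1 then none
  else
    let row := grid.headD []
    let w := row.length
    let pre := takeColored row
    if pre = [] then none
    else some (pvBuild w pre)

-- ===== PRECONDITION & SPEC =====
def Spec_staircase_expand (grid : List (List Int)) (out : Option (List (List Int))) : Prop := out = staircase_expand_alt grid
instance (grid : List (List Int)) (out : Option (List (List Int))) : Decidable (Spec_staircase_expand grid out) := by unfold Spec_staircase_expand; infer_instance

-- ===== CLAIM (what is proved, stated in full; the proofs are below) =====
def Claim_equal_staircase_expand : Prop := ∀ (grid : List (List Int)), Dom_staircase_expand grid → Spec_staircase_expand grid (staircase_expand grid)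

-- ===== LEMMAS AND PROOFS =====

-- the row with its first m cells taken from `row` and the rest background
def pvStair (row : List Int) (m : Nat) : List Int :=
  row.take m ++ List.replicate (row.length - m) 0

theorem colorPrefixLen_le (row : List Int) : colorPrefixLen row 0 ≤ row.length := by
  induction row with
  | nil => simp [colorPrefixLen]
  | cons c rest ih =>
    simp only [colorPrefixLen, List.length_cons]
    split <;> omega

theorem takeColored_length (row : List Int) :
    (takeColored row).length = colorPrefixLen row 0 := by
  induction row with
  | nil => rfl
  | cons c rest ih =>
    simp only [takeColored, colorPrefixLen]
    by_cases h : c = 0 <;> simp [h, ih]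

theorem takeColored_eq_take (row : List Int) :
    takeColored row = row.take (colorPrefixLen row 0) := by
  induction row with
  | nil => rfl
  | cons c rest ih =>
    simp only [takeColored, colorPrefixLen]
    by_cases h : c = 0 <;> simp [h, ih]

theorem pvStair_set_fwd (row : List Int) (m : Nat) (h : m < row.length) :
    (pvStair row m).set m (row.getD m 0) = pvStair row (m + 1) := by
  apply List.ext_getElem
  · simp [pvStair]; omega
  · intro i h1 h2
    simp only [pvStair, List.getElem_set, List.getElem_append, List.length_take,
      List.getElem_take, List.getElem_replicate, List.getD_eq_getElem?_getD,
      List.getElem?_eq_getElem h, Option.getD_some]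
    split_ifs <;> first | rfl | omega | (subst_vars; rfl)

-- A's inner loop builds exactly pvStair row m
theorem innerA (row : List Int) (m : Nat) (h : m ≤ row.length) :
    (List.range m).foldl (fun new_row j => new_row.set j (row.getD j 0))
      (List.replicate row.length 0) = pvStair row m := by
  induction m with
  | zero => simp [pvStair]
  | succ n ih =>
    rw [List.range_succ, List.foldl_append, ih (by omega)]
    simpa using pvStair_set_fwd row n (by omega)

-- append-accumulating fold = map
theorem foldl_app_map {α β : Type} (f : α → β) (l : List α) (acc : List β) :
    l.foldl (fun o i => o ++ [f i]) acc = acc ++ l.map f := by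
  induction l generalizing acc with
  | nil => simp
  | cons x xs ih => simp [ih]

-- B's recursive builder, characterised row by row
theorem pvBuild_eq (w : Nat) (p : List Int) :
    pvBuild w p =
      (List.range p.length).map
        (fun i => p.take (p.length - i) ++ List.replicate (w - (p.length - i)) 0) := by
  induction p using List.reverseRecOn with
  | nil => simp [pvBuild]
  | append_singleton q a ih =>
    rw [pvBuild, dif_neg (by simp)]
    simp only [List.dropLast_concat, List.length_append, List.length_singleton]
    rw [ih, List.range_succ_eq_map, List.map_cons, List.map_map]
    congr 1
    · have : (q ++ [a]).take (q.length + 1) = q ++ [a] := by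
        apply List.take_of_length_le; simp
      simp [this]
    · apply List.map_congr_left
      intro i hi
      simp only [List.mem_range] at hi
      have h1 : q.length + 1 - (i + 1) = q.length - i := by omega
      have h2 : (q ++ [a]).take (q.length - i) = q.take (q.length - i) := by
        rw [List.take_append_of_le_length (by omega)]
      simp [Function.comp, h1, h2]

-- ===== VERDICT (by name: the statement is the Claim_ definition above) =====
theorem staircase_expand_spec : Claim_equal_staircase_expand := by
  intro grid _
  unfold Spec_staircase_expand staircase_expand staircase_expand_alt
  split
  · rfl
  · simp only
    set row := grid.headD [] with hrow
    set k := colorPrefixLen row 0 with hk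
    have hlen : (takeColored row).length = k := takeColored_length row
    have hkle : k ≤ row.length := colorPrefixLen_le row
    by_cases h0 : k = 0
    · have hnil : takeColored row = [] := List.eq_nil_of_length_eq_zero (by omega)
      rw [if_pos h0, if_pos hnil]
    · have hne : takeColored row ≠ [] := by
        intro h; apply h0; rw [← hlen, h]; rfl
      rw [if_neg h0, if_neg hne]
      congr 1
      rw [foldl_app_map, List.nil_append, pvBuild_eq, hlen, takeColored_eq_take, ← hk]
      apply List.map_congr_left
      intro i hi
      simp only [List.mem_range] at hi
      rw [innerA row (k - i) (by omega)]
      simp only [pvStair, List.take_take]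
      have hmin : min (k - i) k = k - i := by omega
      rw [hmin]
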